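-- pv_equiv track=rewrite | github.com/PratikGarai/Coding-Challenges | InterviewBit/Arrays/Arrangement/FindPermutation__SOL2.py | findPerm
-- ===== SOURCE A (Python) =====
-- def findPerm(A, B):
--
--     l = [0 for i in range(B)]
--     le = len(A)
--
--     mx = B
--     mi = 1
--     for i in range(le-1, -1, -1) :
--         if A[i]=="I":
--             l[i+1] = mx
--             mx -= 1
--         else :
--             l[i+1] = mi
--             mi += 1
--
--     l[0] = mi
--     return l
-- ===== SOURCE B (Python) =====
-- def findPerm(A, B):
--     n = len(A)
--     totalI = sum(c == "I" for c in A)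
--     l = [0] * B
--     seenI = 0
--     for i, c in enumerate(A):
--         if c == "I":
--             l[i + 1] = B - (totalI - seenI - 1)
--             seenI += 1
--         else:
--             l[i + 1] = 1 + (n - 1 - i) - (totalI - seenI)
--     l[0] = 1 + (n - totalI)
--     return l
-- ===== Notes on version B (the rewrite author's own statement) =====
-- stated objective: alternative
-- what changed: Replaces the backward pass threading mutable max/min pointers by a single forward pass that pre-counts the 'I' characters and assigns each slot a closed-form value from prefix/suffix counts.
import Mathlib
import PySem

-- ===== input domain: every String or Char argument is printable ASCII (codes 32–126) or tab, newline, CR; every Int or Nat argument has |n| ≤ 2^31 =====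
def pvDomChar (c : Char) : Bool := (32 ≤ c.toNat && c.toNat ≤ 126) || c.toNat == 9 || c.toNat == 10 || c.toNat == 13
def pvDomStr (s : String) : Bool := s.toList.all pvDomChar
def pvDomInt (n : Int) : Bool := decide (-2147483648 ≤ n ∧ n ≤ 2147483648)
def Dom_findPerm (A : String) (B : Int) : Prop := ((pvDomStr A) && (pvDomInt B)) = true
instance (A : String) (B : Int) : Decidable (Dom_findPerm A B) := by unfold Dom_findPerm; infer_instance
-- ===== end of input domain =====

-- B replaces A's backward pass with two mutable pointers by a forward pass assigning each
-- slot a closed-form value from a pre-computed count of 'I' characters (objective: alternative).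

-- ===== PORT A =====
-- literal transliteration of A; l[i+1] = v / l[0] = mi are ported with PySem.List.pySetD,
-- which is exact under Pre_findPerm (out-of-range writes, where Python raises IndexError,
-- are excluded by Pre_findPerm).
def findPerm (A : String) (B : Int) : List Int :=
  let l : List Int := (PySem.List.pyRange 0 B 1).map (fun _ => (0 : Int))  -- [0 for i in range(B)]
  let le : Int := (A.toList.length : Int)
  let st := (PySem.List.pyRange (le - 1) (-1) (-1)).foldl
    (fun (st : List Int × Int × Int) i =>
      match st with
      | (l, mx, mi) =>
        if PySem.Str.pyGet? A i = some 'I' then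
          (PySem.List.pySetD l (i + 1) mx, mx - 1, mi)
        else
          (PySem.List.pySetD l (i + 1) mi, mx, mi + 1))
    (l, B, 1)
  PySem.List.pySetD st.1 0 st.2.2

-- ===== PORT B =====
-- transliteration of Source B: total 'I' count, then one forward enumerate pass with closed-form slot values.
def findPerm_alt (A : String) (B : Int) : List Int :=
  let cs := A.toList
  let n : Int := (cs.length : Int)
  let totalI : Int := (cs.map (fun c => if c == 'I' then (1 : Int) else 0)).sum  -- sum(c == "I" for c in A)
  let l : List Int := PySem.List.pyRepeat [(0 : Int)] B                          -- [0] * B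
  let st := (PySem.List.enumerate cs 0).foldl
    (fun (st : List Int × Int) ic =>
      match st, ic with
      | (l, seenI), (i, c) =>
        if c == 'I' then
          (PySem.List.pySetD l (i + 1) (B - (totalI - seenI - 1)), seenI + 1)
        else
          (PySem.List.pySetD l (i + 1) (1 + (n - 1 - i) - (totalI - seenI)), seenI))
    (l, 0)
  PySem.List.pySetD st.1 0 (1 + (n - totalI))

-- ===== PRECONDITION & SPEC =====
-- A (and B) raise IndexError exactly when B < len(A) + 1 (writing l[i+1] or l[0] out of range).
def Pre_findPerm (A : String) (B : Int) : Prop := (A.toList.length : Int) + 1 ≤ B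
instance (A : String) (B : Int) : Decidable (Pre_findPerm A B) := by unfold Pre_findPerm; infer_instance
def pvWitness_findPerm : String × Int := ("ID", 3)

def Spec_findPerm (A : String) (B : Int) (out : List Int) : Prop := out = findPerm_alt A B
instance (A : String) (B : Int) (out : List Int) : Decidable (Spec_findPerm A B out) := by unfold Spec_findPerm; infer_instance

-- ===== CLAIM (what is proved, stated in full; the proofs are below) =====
def Claim_equal_findPerm : Prop := ∀ (A : String) (B : Int), Dom_findPerm A B → Pre_findPerm A B → Spec_findPerm A B (findPerm A B)

-- ===== LEMMAS AND PROOFS =====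

-- number of 'I' characters, as an Int
def cntI (cs : List Char) : Int := (cs.countP (· == 'I') : Int)
-- number of non-'I' characters
def cntD (cs : List Char) : Int := (cs.length : Int) - cntI cs

-- the common closed form of the tail slots: each slot depends only on its own suffix
def valsF (cs : List Char) (B : Int) : List Int :=
  match cs with
  | [] => []
  | c :: rest => (if c == 'I' then B - cntI rest else 1 + cntD rest) :: valsF rest B

theorem cntI_cons (c : Char) (rest : List Char) :
    cntI (c :: rest) = cntI rest + (if c == 'I' then 1 else 0) := by
  by_cases h : c = 'I' <;> simp [cntI, h]

theorem cntD_cons (c : Char) (rest : List Char) :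
    cntD (c :: rest) = cntD rest + (if c == 'I' then 0 else 1) := by
  by_cases h : c = 'I' <;> simp [cntD, cntI_cons, h] <;> push_cast <;> ring

theorem sumI_eq (cs : List Char) :
    (cs.map (fun c => if c == 'I' then (1 : Int) else 0)).sum = cntI cs := by
  rw [PySem.List.sum_map_ite_one_zero]; rfl

theorem set_at_append {α : Type} (P : List α) (y v : α) (t : List α) :
    (P ++ y :: t).set P.length v = P ++ v :: t := by
  induction P with
  | nil => simp
  | cons a P ih => simp [ih]

theorem drop_head (cs : List Char) (off : Nat) (c : Char) (rest : List Char)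
    (hd : cs.drop off = c :: rest) : cs[off]? = some c := by
  rw [← List.head?_drop, hd]; rfl

theorem loopA (A : String) (B : Int) :
    ∀ (ss : List Char) (off : Nat), A.toList.drop off = ss →
    ∀ (P : List Int), P.length = off + 1 → ∀ (z : Nat),
    List.foldr
      (fun i (st : List Int × Int × Int) =>
        match st with
        | (l, mx, mi) =>
          if PySem.Str.pyGet? A i = some 'I' then
            (PySem.List.pySetD l (i + 1) mx, mx - 1, mi)
          else
            (PySem.List.pySetD l (i + 1) mi, mx, mi + 1))
      (P ++ List.replicate (ss.length + z) 0, B, 1)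
      (PySem.List.pyRange (off : Int) ((off : Int) + ss.length) 1)
    = (P ++ valsF ss B ++ List.replicate z 0, B - cntI ss, 1 + cntD ss) := by
  intro ss
  induction ss with
  | nil =>
    intro off hd P hP z
    rw [show ((off : Int) + (([] : List Char).length : Int)) = (off : Int) by simp,
        PySem.List.pyRange_one_eq_nil le_rfl]
    simp [valsF, cntI, cntD]
  | cons c rest ih =>
    intro off hd P hP z
    have hc1 : ((c :: rest : List Char).length : Int) = (rest.length : Int) + 1 := by
      simp
    have hlt : (off : Int) < (off : Int) + ((c :: rest : List Char).length : Int) := by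
      rw [hc1]; omega
    rw [PySem.List.pyRange_one_cons hlt, List.foldr_cons]
    have hrange : PySem.List.pyRange ((off : Int) + 1) ((off : Int) + ((c :: rest : List Char).length : Int)) 1
        = PySem.List.pyRange ((off + 1 : Nat) : Int) (((off + 1 : Nat) : Int) + (rest.length : Int)) 1 := by
      rw [hc1]; congr 1 <;> push_cast <;> ring
    rw [hrange]
    have hd' : A.toList.drop (off + 1) = rest := by
      rw [← List.drop_drop, hd]; rfl
    have hinit : P ++ List.replicate ((c :: rest : List Char).length + z) (0 : Int)
        = (P ++ [(0 : Int)]) ++ List.replicate (rest.length + z) 0 := by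
      rw [show (c :: rest : List Char).length + z = (rest.length + z) + 1 by
            simp [List.length_cons]; omega,
          List.replicate_succ]
      simp
    rw [hinit, ih (off + 1) hd' (P ++ [0]) (by simp [hP]) z]
    have hget : PySem.Str.pyGet? A (off : Int) = some c := by
      rw [PySem.Str.pyGet?_natCast]; exact drop_head A.toList off c rest hd
    have hset : ∀ v : Int,
        PySem.List.pySetD (((P ++ [(0 : Int)]) ++ valsF rest B ++ List.replicate z 0)) ((off : Int) + 1) v
        = P ++ (v :: valsF rest B) ++ List.replicate z 0 := by
      intro v
      rw [show ((off : Int) + 1) = ((off + 1 : Nat) : Int) by push_cast; ring,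
          PySem.List.pySetD_natCast]
      rw [show (P ++ [(0 : Int)]) ++ valsF rest B ++ List.replicate z 0
            = P ++ (0 :: (valsF rest B ++ List.replicate z 0)) by simp,
          show off + 1 = P.length by omega, set_at_append]
      simp
    dsimp only
    rw [hget]
    by_cases hc : c = 'I'
    · rw [if_pos (by rw [hc]), hset]
      refine Prod.ext ?_ (Prod.ext ?_ ?_)
      · simp [valsF, hc]
      · rw [cntI_cons]; simp [hc]; try ring
      · rw [cntD_cons]; simp [hc]
    · rw [if_neg (by simp [hc]), hset]
      refine Prod.ext ?_ (Prod.ext ?_ ?_)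
      · simp [valsF, hc]
      · rw [cntI_cons]; simp [hc]
      · rw [cntD_cons]; simp [hc]; try ring

theorem loopB (A : String) (B : Int) :
    ∀ (ss : List Char) (off : Nat), A.toList.drop off = ss → off + ss.length = A.toList.length →
    ∀ (P : List Int), P.length = off + 1 → ∀ (z : Nat) (s : Int),
    s = cntI A.toList - cntI ss →
    List.foldl
      (fun (st : List Int × Int) (ic : Int × Char) =>
        if ic.2 == 'I' then
          (PySem.List.pySetD st.1 (ic.1 + 1) (B - (cntI A.toList - st.2 - 1)), st.2 + 1)
        else
          (PySem.List.pySetD st.1 (ic.1 + 1) (1 + ((A.toList.length : Int) - 1 - ic.1) - (cntI A.toList - st.2)), st.2))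
      (P ++ List.replicate (ss.length + z) 0, s)
      (PySem.List.enumerate ss (off : Int))
    = (P ++ valsF ss B ++ List.replicate z 0, cntI A.toList) := by
  intro ss
  induction ss with
  | nil =>
    intro off hd hlen P hP z s hs
    simp only [PySem.List.enumerate_nil, List.foldl_nil]
    refine Prod.ext ?_ ?_
    · simp [valsF]
    · simp [cntI] at hs ⊢; omega
  | cons c rest ih =>
    intro off hd hlen P hP z s hs
    rw [PySem.List.enumerate_cons, List.foldl_cons]
    have hd' : A.toList.drop (off + 1) = rest := by
      rw [← List.drop_drop, hd]; rfl
    have hlen' : off + 1 + rest.length = A.toList.length := by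
      simp only [List.length_cons] at hlen; omega
    have hset : ∀ v : Int,
        PySem.List.pySetD (P ++ List.replicate ((c :: rest : List Char).length + z) (0 : Int)) ((off : Int) + 1) v
        = (P ++ [v]) ++ List.replicate (rest.length + z) 0 := by
      intro v
      rw [show (c :: rest : List Char).length + z = (rest.length + z) + 1 by
            simp [List.length_cons]; omega,
          List.replicate_succ,
          show ((off : Int) + 1) = ((off + 1 : Nat) : Int) by push_cast; ring,
          PySem.List.pySetD_natCast,
          show off + 1 = P.length by omega, set_at_append]
      simp
    have hstep : PySem.List.enumerate rest ((off : Int) + 1)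
        = PySem.List.enumerate rest ((off + 1 : Nat) : Int) := by
      norm_cast
    dsimp only
    by_cases hc : c = 'I'
    · rw [if_pos (by simp [hc]), hset, hstep,
          ih (off + 1) hd' hlen' (P ++ [B - (cntI A.toList - s - 1)]) (by simp [hP]) z (s + 1)
            (by rw [hs, cntI_cons]; simp [hc]; try ring)]
      have hv : B - (cntI A.toList - s - 1) = B - cntI rest := by
        rw [hs, cntI_cons]; simp [hc]; try ring
      rw [hv]
      simp [valsF, hc]
    · rw [if_neg (by simp [hc]), hset, hstep,
          ih (off + 1) hd' hlen'
            (P ++ [1 + ((A.toList.length : Int) - 1 - (off : Int)) - (cntI A.toList - s)])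
            (by simp [hP]) z s (by rw [hs, cntI_cons]; simp [hc])]
      have hv : 1 + ((A.toList.length : Int) - 1 - (off : Int)) - (cntI A.toList - s) = 1 + cntD rest := by
        have h1 : (A.toList.length : Int) = (off : Int) + 1 + (rest.length : Int) := by
          push_cast [← hlen']; ring
        rw [hs, cntI_cons, h1]
        simp [cntD, hc]; ring
      rw [hv]
      simp [valsF, hc]

theorem map_const_range (B : Int) (h : 0 ≤ B) :
    (PySem.List.pyRange 0 B 1).map (fun _ => (0 : Int)) = List.replicate B.toNat 0 := by
  rw [List.map_const']
  congr 1
  rw [PySem.List.length_pyRange_one]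
  omega

-- ===== VERDICT (by name: the statement is the Claim_ definition above) =====
theorem findPerm_spec : Claim_equal_findPerm := by
  intro A B _ hpre
  have hpre' : (A.toList.length : Int) + 1 ≤ B := hpre
  unfold Spec_findPerm findPerm findPerm_alt
  simp only [sumI_eq, PySem.List.pyRepeat_singleton, map_const_range B (by omega)]
  obtain ⟨z, hzz⟩ : ∃ z : Nat, B.toNat = A.toList.length + z + 1 :=
    ⟨B.toNat - A.toList.length - 1, by omega⟩
  have hrepl : List.replicate B.toNat (0 : Int)
      = [(0 : Int)] ++ List.replicate (A.toList.length + z) 0 := by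
    rw [hzz, List.replicate_succ]; rfl
  rw [hrepl]
  -- A side: countdown range = reverse of the ascending range, foldl of reverse = foldr
  have hr : PySem.List.pyRange ((A.toList.length : Int) - 1) (-1) (-1)
      = (PySem.List.pyRange ((0 : Nat) : Int) (((0 : Nat) : Int) + (A.toList.length : Int)) 1).reverse := by
    rw [PySem.List.pyRange_neg_one_eq_reverse]
    congr 1 <;> norm_num
  rw [hr, List.foldl_reverse]
  rw [loopA A B A.toList 0 (by simp) [0] (by simp) z]
  have lB := loopB A B A.toList 0 (by simp) (by simp) [0] (by simp) z 0 (by ring)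
  rw [Nat.cast_zero] at lB
  rw [lB]
  simp [PySem.List.pySetD, cntD]
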